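-- pv_equiv track=rewrite | github.com/Michael-huo/ExpHub | exphub/encode/motion_segment.py | _pc_summary
-- ===== SOURCE A (Python) =====
-- def _pc_summary(pair_states, interval):
--     start = int(interval.get("pair_start", 0) or 0)
--     end = int(interval.get("pair_end", -1) or -1)
--     if end < start:
--         return "none"
--     parts = []
--     idx = start
--     while idx <= end and idx < len(pair_states):
--         label = str(pair_states[idx].get("motion_state", "mixed") or "mixed")
--         run_end = idx
--         while run_end + 1 <= end and run_end + 1 < len(pair_states):
--             if str(pair_states[run_end + 1].get("motion_state", "mixed") or "mixed") != label:
--                 break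
--             run_end += 1
--         if label != "mixed":
--             parts.append("{}[{}-{}]".format(label, int(idx), int(run_end)))
--         idx = run_end + 1
--     return "; ".join(parts) if parts else "none"
-- ===== SOURCE B (Python) =====
-- def _pc_summary(pair_states, interval):
--     start = int(interval.get("pair_start", 0) or 0)
--     end = int(interval.get("pair_end", -1) or -1)
--     hi = min(end, len(pair_states) - 1)
--     labels = [str(pair_states[i].get("motion_state", "mixed") or "mixed")
--               for i in range(start, hi + 1)]
--     parts = []
--     run_label = None
--     run_start = start
--     for i, lab in enumerate(labels, start):
--         if lab != run_label:
--             if run_label is not None and run_label != "mixed":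
--                 parts.append("{}[{}-{}]".format(run_label, int(run_start), int(i - 1)))
--             run_label = lab
--             run_start = i
--     if run_label is not None and run_label != "mixed":
--         parts.append("{}[{}-{}]".format(run_label, int(run_start), int(hi)))
--     return "; ".join(parts) if parts else "none"
-- ===== Notes on version B (the rewrite author's own statement) =====
-- stated objective: alternative
-- what changed: A interleaves a nested while-scan (inner lookahead finds each run's end before emitting it); B first materializes the clamped label list and then makes a single enumerate pass carrying the open run (label, start), flushing a part at each label change and once at the end.
import Mathlib
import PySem

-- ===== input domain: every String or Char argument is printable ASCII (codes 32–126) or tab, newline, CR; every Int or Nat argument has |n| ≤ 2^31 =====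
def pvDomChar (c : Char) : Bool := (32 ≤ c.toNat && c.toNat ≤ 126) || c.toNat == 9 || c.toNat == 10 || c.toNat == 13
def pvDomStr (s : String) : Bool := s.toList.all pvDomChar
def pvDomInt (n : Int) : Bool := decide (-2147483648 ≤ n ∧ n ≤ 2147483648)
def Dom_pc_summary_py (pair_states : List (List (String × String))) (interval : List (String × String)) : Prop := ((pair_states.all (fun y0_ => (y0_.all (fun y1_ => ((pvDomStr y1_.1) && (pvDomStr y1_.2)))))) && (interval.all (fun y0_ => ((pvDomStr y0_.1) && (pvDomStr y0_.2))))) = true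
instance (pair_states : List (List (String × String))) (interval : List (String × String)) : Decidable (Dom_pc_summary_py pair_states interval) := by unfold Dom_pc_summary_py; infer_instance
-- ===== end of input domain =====

-- B replaces A's nested while-scan by building the label list once and folding over it with a carried
-- current run; objective: alternative single-pass decomposition (same asymptotic cost).

-- shared helpers (identical subexpressions of both Pythons):
-- int(interval.get(key, dflt) or dflt)  — parse failure is a ValueError, excluded by Pre_
def pvGetIntD (interval : List (String × String)) (key : String) (dflt : Int) : Int :=
  match interval.lookup key with
  | none => dflt
  | some s => if s = "" then dflt else (PySem.Int.ofStr? s).getD dflt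

-- str(pair_states[i].get("motion_state", "mixed") or "mixed") — pyGetD total form, under Pre_'s index condition
def pvLabel (pair_states : List (List (String × String))) (i : Int) : String :=
  let v := ((PySem.List.pyGetD pair_states i []).lookup "motion_state").getD "mixed"
  if v = "" then "mixed" else v

-- "{}[{}-{}]".format(label, int(a), int(b))
def pvFmt (label : String) (a b : Int) : String :=
  PySem.Str.join "" [label, "[", PySem.Int.toStr a, "-", PySem.Int.toStr b, "]"]

-- ===== PORT A =====
-- inner while: extend run_end while the next label equals label
def pvInnerA (pair_states : List (List (String × String))) (endI : Int) (label : String)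
    (runEnd : Int) : Int :=
  if h : runEnd + 1 ≤ endI ∧ runEnd + 1 < (pair_states.length : Int) then
    if pvLabel pair_states (runEnd + 1) ≠ label then runEnd
    else pvInnerA pair_states endI label (runEnd + 1)
  else runEnd
termination_by ((pair_states.length : Int) - runEnd).toNat

theorem pvInnerA_ge (pair_states : List (List (String × String))) (endI : Int) (label : String)
    (runEnd : Int) : runEnd ≤ pvInnerA pair_states endI label runEnd := by
  fun_induction pvInnerA <;> omega

theorem pvInnerA_lt (pair_states : List (List (String × String))) (endI : Int) (label : String)
    (runEnd : Int) (h : runEnd < (pair_states.length : Int)) :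
    pvInnerA pair_states endI label runEnd < (pair_states.length : Int) := by
  fun_induction pvInnerA <;> simp_all <;> omega

-- outer while over idx
def pvLoopA (pair_states : List (List (String × String))) (endI : Int) (idx : Int)
    (parts : List String) : List String :=
  if h : idx ≤ endI ∧ idx < (pair_states.length : Int) then
    let label := pvLabel pair_states idx
    let runEnd := pvInnerA pair_states endI label idx
    pvLoopA pair_states endI (runEnd + 1)
      (if label ≠ "mixed" then parts ++ [pvFmt label idx runEnd] else parts)
  else parts
termination_by ((pair_states.length : Int) - idx).toNat
decreasing_by
  have h1 := pvInnerA_ge pair_states endI (pvLabel pair_states idx) idx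
  have h2 := pvInnerA_lt pair_states endI (pvLabel pair_states idx) idx h.2
  omega

def pc_summary_py (pair_states : List (List (String × String))) (interval : List (String × String)) : String :=
  let start := pvGetIntD interval "pair_start" 0
  let endI := pvGetIntD interval "pair_end" (-1)
  if endI < start then "none"
  else
    let parts := pvLoopA pair_states endI start []
    if parts = [] then "none" else PySem.Str.join "; " parts

-- ===== PORT B =====
-- one enumerate step of Source B's for-loop: state = (parts, run_label, run_start)
def pvStepB (acc : List String × Option String × Int) (p : Int × String) :
    List String × Option String × Int :=
  let (parts, runLabel, runStart) := acc
  let (i, lab) := p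
  if some lab ≠ runLabel then
    ((match runLabel with
      | some rl => if rl ≠ "mixed" then parts ++ [pvFmt rl runStart (i - 1)] else parts
      | none => parts), some lab, i)
  else acc

def pc_summary_py_alt (pair_states : List (List (String × String))) (interval : List (String × String)) : String :=
  let start := pvGetIntD interval "pair_start" 0
  let endI := pvGetIntD interval "pair_end" (-1)
  let hi := min endI ((pair_states.length : Int) - 1)
  let labels := (PySem.List.pyRange start (hi + 1) 1).map (pvLabel pair_states)
  let st := (PySem.List.enumerate labels start).foldl pvStepB ([], none, start)
  let parts :=
    match st.2.1 with
    | some rl => if rl ≠ "mixed" then st.1 ++ [pvFmt rl st.2.2 hi] else st.1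
    | none => st.1
  if parts = [] then "none" else PySem.Str.join "; " parts

-- ===== PRECONDITION & SPEC =====
-- int(value) must parse where a nonempty value is present (else A raises ValueError)
def pvKeyOk (interval : List (String × String)) (key : String) : Bool :=
  match interval.lookup key with
  | none => true
  | some s => s == "" || (PySem.Int.ofStr? s).isSome

-- Pre_ excludes exactly the inputs where Python A raises: a present nonempty interval value that
-- int() cannot parse (ValueError), and a start below -len(pair_states) with a nonempty index range
-- (IndexError on pair_states[start]).
def Pre_pc_summary_py (pair_states : List (List (String × String))) (interval : List (String × String)) : Prop :=
  pvKeyOk interval "pair_start" = true ∧ pvKeyOk interval "pair_end" = true ∧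
  (pvGetIntD interval "pair_end" (-1) < pvGetIntD interval "pair_start" 0 ∨
   -(pair_states.length : Int) ≤ pvGetIntD interval "pair_start" 0)
instance (pair_states : List (List (String × String))) (interval : List (String × String)) : Decidable (Pre_pc_summary_py pair_states interval) := by unfold Pre_pc_summary_py; infer_instance

def pvWitness_pc_summary_py : (List (List (String × String))) × (List (String × String)) :=
  ([[("motion_state", "walk")], [("motion_state", "walk")], [("motion_state", "run")]],
   [("pair_start", "0"), ("pair_end", "2")])

def Spec_pc_summary_py (pair_states : List (List (String × String))) (interval : List (String × String)) (out : String) : Prop := out = pc_summary_py_alt pair_states interval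
instance (pair_states : List (List (String × String))) (interval : List (String × String)) (out : String) : Decidable (Spec_pc_summary_py pair_states interval out) := by unfold Spec_pc_summary_py; infer_instance

-- ===== CLAIM (what is proved, stated in full; the proofs are below) =====
def Claim_equal_pc_summary_py : Prop := ∀ (pair_states : List (List (String × String))) (interval : List (String × String)), Dom_pc_summary_py pair_states interval → Pre_pc_summary_py pair_states interval → Spec_pc_summary_py pair_states interval (pc_summary_py pair_states interval)

-- ===== LEMMAS AND PROOFS =====

-- close a run [rs..re] of label L onto parts
def pvClose (parts : List String) (L : String) (rs re : Int) : List String :=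
  if L ≠ "mixed" then parts ++ [pvFmt L rs re] else parts

-- abstract form of the remaining computation of both programs after the first element of a run:
-- scanning positions i..hi with an open run of label L started at rs
def pvGo (pair_states : List (List (String × String))) (hi i : Int) (parts : List String)
    (L : String) (rs : Int) : List String :=
  if h : i ≤ hi then
    if pvLabel pair_states i = L then pvGo pair_states hi (i + 1) parts L rs
    else pvGo pair_states hi (i + 1) (pvClose parts L rs (i - 1)) (pvLabel pair_states i) i
  else pvClose parts L rs hi
termination_by (hi + 1 - i).toNat

-- finish of Source B's loop: flush the open run with end hi
def pvFinish (hi : Int) (st : List String × Option String × Int) : List String :=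
  match st.2.1 with
  | some rl => if rl ≠ "mixed" then st.1 ++ [pvFmt rl st.2.2 hi] else st.1
  | none => st.1

theorem pvEnumerate_map_pyRange (f : Int → String) :
    ∀ (n : Nat) (a b : Int), (b - a).toNat ≤ n →
    PySem.List.enumerate ((PySem.List.pyRange a b 1).map f) a
      = (PySem.List.pyRange a b 1).map (fun j => (j, f j)) := by
  intro n
  induction n with
  | zero =>
    intro a b h
    rw [PySem.List.pyRange_one_eq_nil (by omega)]
    simp [PySem.List.enumerate_nil]
  | succ n ih =>
    intro a b h
    by_cases hab : a < b
    · rw [PySem.List.pyRange_one_cons hab]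
      simp only [List.map_cons, PySem.List.enumerate_cons]
      rw [ih (a + 1) b (by omega)]
    · rw [PySem.List.pyRange_one_eq_nil (by omega)]
      simp [PySem.List.enumerate_nil]

theorem pvFold_eq_go (ps : List (List (String × String))) (hi : Int) :
    ∀ (n : Nat) (i : Int) (parts : List String) (L : String) (rs : Int), (hi + 1 - i).toNat ≤ n →
    pvFinish hi (((PySem.List.pyRange i (hi + 1) 1).map (fun j => (j, pvLabel ps j))).foldl
        pvStepB (parts, some L, rs))
      = pvGo ps hi i parts L rs := by
  intro n
  induction n with
  | zero =>
    intro i parts L rs h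
    rw [PySem.List.pyRange_one_eq_nil (by omega), pvGo]
    simp only [List.map_nil, List.foldl_nil]
    rw [dif_neg (by omega)]
    rfl
  | succ n ih =>
    intro i parts L rs h
    by_cases hih : i ≤ hi
    · rw [PySem.List.pyRange_one_cons (by omega), pvGo, dif_pos hih]
      simp only [List.map_cons, List.foldl_cons]
      by_cases heq : pvLabel ps i = L
      · rw [if_pos heq]
        have hstep : pvStepB (parts, some L, rs) (i, pvLabel ps i) = (parts, some L, rs) := by
          simp [pvStepB, heq]
        rw [hstep, ih (i + 1) parts L rs (by omega)]
      · rw [if_neg heq]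
        have hstep : pvStepB (parts, some L, rs) (i, pvLabel ps i)
            = (pvClose parts L rs (i - 1), some (pvLabel ps i), i) := by
          simp [pvStepB, pvClose, heq]
        rw [hstep, ih (i + 1) _ _ _ (by omega)]
    · rw [PySem.List.pyRange_one_eq_nil (by omega), pvGo, dif_neg hih]
      simp only [List.map_nil, List.foldl_nil]
      rfl

theorem pvInnerA_le_hi (ps : List (List (String × String))) (endI : Int) (L : String)
    (hi : Int) (hhi : hi = min endI ((ps.length : Int) - 1)) :
    ∀ (j : Int), j ≤ hi → pvInnerA ps endI L j ≤ hi := by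
  intro j hj
  fun_induction pvInnerA <;> simp_all <;> omega

theorem pvGo_run (ps : List (List (String × String))) (endI hi : Int)
    (hhi : hi = min endI ((ps.length : Int) - 1)) :
    ∀ (n : Nat) (j : Int) (parts : List String) (L : String) (rs : Int),
      (hi + 1 - j).toNat ≤ n → j ≤ hi →
    pvGo ps hi (j + 1) parts L rs =
      if pvInnerA ps endI L j + 1 ≤ hi then
        pvGo ps hi (pvInnerA ps endI L j + 2)
          (pvClose parts L rs (pvInnerA ps endI L j))
          (pvLabel ps (pvInnerA ps endI L j + 1)) (pvInnerA ps endI L j + 1)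
      else pvClose parts L rs hi := by
  intro n
  induction n with
  | zero => intro j parts L rs h hj; omega
  | succ n ih =>
    intro j parts L rs h hj
    by_cases hcond : j + 1 ≤ endI ∧ j + 1 < (ps.length : Int)
    · by_cases hlab : pvLabel ps (j + 1) = L
      · -- run extends
        have hinner : pvInnerA ps endI L j = pvInnerA ps endI L (j + 1) := by
          rw [pvInnerA, dif_pos hcond, if_neg (by simp [hlab])]
        rw [hinner, pvGo, dif_pos (show j + 1 ≤ hi by omega), if_pos hlab]
        exact ih (j + 1) parts L rs (by omega) (by omega)
      · -- run breaks at j + 1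
        have hinner : pvInnerA ps endI L j = j := by
          rw [pvInnerA, dif_pos hcond, if_pos hlab]
        rw [hinner, pvGo, dif_pos (show j + 1 ≤ hi by omega), if_neg hlab,
          if_pos (show j + 1 ≤ hi by omega)]
        rw [show j + 1 - 1 = j from by omega, show j + 1 + 1 = j + 2 from by omega]
    · -- scan is over: j + 1 is past the admissible range, so the run ends at hi = j
      have hinner : pvInnerA ps endI L j = j := by rw [pvInnerA, dif_neg hcond]
      rw [hinner, pvGo, dif_neg (show ¬ j + 1 ≤ hi by omega), if_neg (by omega)]

theorem pvLoopA_eq_go (ps : List (List (String × String))) (endI hi : Int)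
    (hhi : hi = min endI ((ps.length : Int) - 1)) :
    ∀ (n : Nat) (j : Int) (parts : List String), (hi - j).toNat ≤ n → j ≤ hi →
    pvLoopA ps endI j parts = pvGo ps hi (j + 1) parts (pvLabel ps j) j := by
  intro n
  induction n with
  | zero =>
    intro j parts h hj
    have hge := pvInnerA_ge ps endI (pvLabel ps j) j
    have hle := pvInnerA_le_hi ps endI (pvLabel ps j) hi hhi j hj
    rw [pvLoopA, dif_pos (show j ≤ endI ∧ j < (ps.length : Int) from by omega)]
    show pvLoopA ps endI (pvInnerA ps endI (pvLabel ps j) j + 1)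
        (pvClose parts (pvLabel ps j) j (pvInnerA ps endI (pvLabel ps j) j))
      = pvGo ps hi (j + 1) parts (pvLabel ps j) j
    rw [pvGo_run ps endI hi hhi (hi + 1 - j).toNat j parts (pvLabel ps j) j (le_refl _) hj]
    rw [if_neg (by omega)]
    rw [pvLoopA, dif_neg (by omega)]
    rw [show pvInnerA ps endI (pvLabel ps j) j = hi from by omega]
  | succ n ih =>
    intro j parts h hj
    have hge := pvInnerA_ge ps endI (pvLabel ps j) j
    have hle := pvInnerA_le_hi ps endI (pvLabel ps j) hi hhi j hj
    rw [pvLoopA, dif_pos (show j ≤ endI ∧ j < (ps.length : Int) from by omega)]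
    show pvLoopA ps endI (pvInnerA ps endI (pvLabel ps j) j + 1)
        (pvClose parts (pvLabel ps j) j (pvInnerA ps endI (pvLabel ps j) j))
      = pvGo ps hi (j + 1) parts (pvLabel ps j) j
    rw [pvGo_run ps endI hi hhi (hi + 1 - j).toNat j parts (pvLabel ps j) j (le_refl _) hj]
    by_cases hcont : pvInnerA ps endI (pvLabel ps j) j + 1 ≤ hi
    · rw [if_pos hcont]
      rw [ih (pvInnerA ps endI (pvLabel ps j) j + 1)
        (pvClose parts (pvLabel ps j) j (pvInnerA ps endI (pvLabel ps j) j)) (by omega) hcont]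
      rw [show pvInnerA ps endI (pvLabel ps j) j + 1 + 1
        = pvInnerA ps endI (pvLabel ps j) j + 2 from by omega]
    · rw [if_neg hcont, pvLoopA, dif_neg (by omega)]
      rw [show pvInnerA ps endI (pvLabel ps j) j = hi from by omega]

-- ===== VERDICT (by name: the statement is the Claim_ definition above) =====
theorem pc_summary_py_spec : Claim_equal_pc_summary_py := by
  intro ps interval _ _
  show pc_summary_py ps interval = pc_summary_py_alt ps interval
  set st := pvGetIntD interval "pair_start" 0 with hstdef
  set en := pvGetIntD interval "pair_end" (-1) with hendef
  set hi := min en ((ps.length : Int) - 1) with hhi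
  show (if en < st then "none"
        else if pvLoopA ps en st [] = [] then "none"
        else PySem.Str.join "; " (pvLoopA ps en st []))
     = (if pvFinish hi (((PySem.List.enumerate
            ((PySem.List.pyRange st (hi + 1) 1).map (pvLabel ps)) st)).foldl
            pvStepB ([], none, st)) = [] then "none"
        else PySem.Str.join "; " (pvFinish hi (((PySem.List.enumerate
            ((PySem.List.pyRange st (hi + 1) 1).map (pvLabel ps)) st)).foldl
            pvStepB ([], none, st))))
  rw [pvEnumerate_map_pyRange (pvLabel ps) (hi + 1 - st).toNat st (hi + 1) (le_refl _)]
  by_cases hlt : en < st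
  · rw [if_pos hlt, PySem.List.pyRange_one_eq_nil (show hi + 1 ≤ st from by omega)]
    simp [pvFinish]
  · rw [if_neg hlt]
    by_cases hsh : st ≤ hi
    · rw [PySem.List.pyRange_one_cons (show st < hi + 1 from by omega)]
      simp only [List.map_cons, List.foldl_cons]
      rw [show pvStepB ([], none, st) (st, pvLabel ps st)
        = ([], some (pvLabel ps st), st) from by simp [pvStepB]]
      rw [pvFold_eq_go ps hi (hi + 1 - (st + 1)).toNat (st + 1) [] (pvLabel ps st) st (le_refl _)]
      rw [pvLoopA_eq_go ps en hi hhi (hi - st).toNat st [] (le_refl _) hsh]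
    · -- empty range: A's loop condition is false at st, B's label list is empty
      rw [PySem.List.pyRange_one_eq_nil (show hi + 1 ≤ st from by omega),
        pvLoopA, dif_neg (show ¬ (st ≤ en ∧ st < (ps.length : Int)) from by omega)]
      simp [pvFinish]
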